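-- pv_equiv track=rewrite | github.com/sasha01zuev/VazonezArbitrageBot | handlers/users/settings/blacklist_networks.py | format_blacklist_message
-- ===== SOURCE A (Python) =====
-- TELEGRAM_MESSAGE_LIMIT = 4096
--
-- ELLIPSIS = "..."
--
-- def format_blacklist_message(blacklist_coins: list[str], header_text: str) -> str:
--     header = header_text
--     base_length = len(header)
--     networks_text = ""
--     total_length = base_length
--
--     for i, network in enumerate(blacklist_coins):
--         # добавляем запятую и пробел, если это не первая сеть
--         separator = ", " if i > 0 else ""
--         part = f"<b>{separator}{network}</b>"
--         new_length = total_length + len(part)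
--
--         # если следующая сеть не влезает — добавляем многоточие и выходим
--         if new_length + len(ELLIPSIS) > TELEGRAM_MESSAGE_LIMIT:
--             networks_text += ELLIPSIS
--             break
--
--         networks_text += part
--         total_length = new_length
--
--     return header + networks_text
-- ===== SOURCE B (Python) =====
-- TELEGRAM_MESSAGE_LIMIT = 4096
--
-- ELLIPSIS = "..."
--
-- def format_blacklist_message(blacklist_coins: list[str], header_text: str) -> str:
--     # table-then-select: format all parts, build a cumulative-length table,
--     # back-scan it for the largest prefix that (with ellipsis room) fits.
--     parts = ["<b>" + (", " if i > 0 else "") + c + "</b>"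
--              for i, c in enumerate(blacklist_coins)]
--     cum = [len(header_text)]
--     total = len(header_text)
--     for p in parts:
--         total += len(p)
--         cum.append(total)
--     budget = TELEGRAM_MESSAGE_LIMIT - len(ELLIPSIS)
--     k = len(parts)
--     while k > 0 and cum[k] > budget:
--         k -= 1
--     tail = ELLIPSIS if k < len(parts) else ""
--     return header_text + "".join(parts[:k]) + tail
-- ===== Notes on version B (the rewrite author's own statement) =====
-- stated objective: alternative
-- what changed: Replaces A's single incremental accumulate-with-break loop by a table-then-select decomposition: format all parts up front, build a cumulative-length table seeded with len(header), back-scan it for the largest fitting prefix k, then join the first k parts and append the ellipsis iff k < len(parts).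
import Mathlib
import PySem

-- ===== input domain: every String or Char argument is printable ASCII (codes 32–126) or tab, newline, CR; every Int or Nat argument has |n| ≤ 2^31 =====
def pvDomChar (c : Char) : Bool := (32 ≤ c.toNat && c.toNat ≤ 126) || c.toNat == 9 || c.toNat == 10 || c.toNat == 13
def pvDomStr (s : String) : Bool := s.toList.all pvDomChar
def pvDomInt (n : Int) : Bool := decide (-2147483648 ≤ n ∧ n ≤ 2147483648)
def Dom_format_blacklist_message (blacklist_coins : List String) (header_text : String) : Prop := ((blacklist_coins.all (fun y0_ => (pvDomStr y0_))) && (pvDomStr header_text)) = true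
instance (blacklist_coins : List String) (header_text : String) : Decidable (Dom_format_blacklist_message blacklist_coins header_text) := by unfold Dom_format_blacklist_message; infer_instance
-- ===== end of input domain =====

-- B replaces A's incremental accumulate-with-break loop by a table-then-select decomposition
-- (format all parts, build a cumulative-length table, back-scan for the largest fitting prefix);
-- objective: alternative (same cost), proved to return exactly A's string.

-- ===== PORT A =====
-- the for-loop of A: state = (networks_text, total_length); break returns immediately
def pvLoopA : List (Int × String) → String → Int → String
  | [], networks_text, _ => networks_text
  | (i, network) :: rest, networks_text, total_length =>
    let separator := if i > 0 then ", " else ""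
    let part := "<b>" ++ separator ++ network ++ "</b>"
    let new_length := total_length + PySem.Str.len part
    if new_length + PySem.Str.len "..." > 4096 then networks_text ++ "..."
    else pvLoopA rest (networks_text ++ part) new_length

def format_blacklist_message (blacklist_coins : List String) (header_text : String) : String :=
  let header := header_text
  let base_length := PySem.Str.len header
  header ++ pvLoopA (PySem.List.enumerate blacklist_coins 0) "" base_length

-- ===== PORT B =====
def pvPart (i : Int) (c : String) : String :=
  "<b>" ++ (if i > 0 then ", " else "") ++ c ++ "</b>"

-- Source B's cumulative-table loop: state = (cum, total)
def pvCumLoop : List String → List Int → Int → List Int × Int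
  | [], cum, total => (cum, total)
  | p :: rest, cum, total =>
    let total' := total + PySem.Str.len p
    pvCumLoop rest (cum ++ [total']) total'

-- Source B's back-scan while-loop on k
def pvFindK (cum : List Int) (budget : Int) : Nat → Nat
  | 0 => 0
  | k + 1 =>
    if PySem.List.pyGetD cum ((k + 1 : Nat) : Int) 0 > budget then pvFindK cum budget k
    else k + 1

def format_blacklist_message_alt (blacklist_coins : List String) (header_text : String) : String :=
  let parts := (PySem.List.enumerate blacklist_coins 0).map (fun ic => pvPart ic.1 ic.2)
  let cum := (pvCumLoop parts [PySem.Str.len header_text] (PySem.Str.len header_text)).1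
  let budget := 4096 - PySem.Str.len "..."
  let k := pvFindK cum budget parts.length
  let tail := if k < parts.length then "..." else ""
  header_text ++ PySem.Str.join "" (PySem.List.slice parts none (some (k : Int))) ++ tail

-- ===== PRECONDITION & SPEC =====
def Spec_format_blacklist_message (blacklist_coins : List String) (header_text : String) (out : String) : Prop := out = format_blacklist_message_alt blacklist_coins header_text
instance (blacklist_coins : List String) (header_text : String) (out : String) : Decidable (Spec_format_blacklist_message blacklist_coins header_text out) := by unfold Spec_format_blacklist_message; infer_instance

-- ===== CLAIM (what is proved, stated in full; the proofs are below) =====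
def Claim_equal_format_blacklist_message : Prop := ∀ (blacklist_coins : List String) (header_text : String), Dom_format_blacklist_message blacklist_coins header_text → Spec_format_blacklist_message blacklist_coins header_text (format_blacklist_message blacklist_coins header_text)

-- ===== LEMMAS AND PROOFS =====

-- abstract form of A's loop, on the already-formatted parts
def pvLoopP : List String → String → Int → String
  | [], acc, _ => acc
  | p :: rest, acc, t =>
    let n := t + PySem.Str.len p
    if n + PySem.Str.len "..." > 4096 then acc ++ "..."
    else pvLoopP rest (acc ++ p) n

-- how many parts A's loop accepts
def pvM : List String → Int → Nat
  | [], _ => 0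
  | p :: rest, t =>
    if t + PySem.Str.len p + PySem.Str.len "..." > 4096 then 0
    else pvM rest (t + PySem.Str.len p) + 1

-- total length of a list of parts
def pvS (ps : List String) : Int := (ps.map PySem.Str.len).sum

-- the cumulative sums appended by Source B's table loop
def pvCums : List String → Int → List Int
  | [], _ => []
  | p :: rest, t => (t + PySem.Str.len p) :: pvCums rest (t + PySem.Str.len p)

lemma pvJoinNil : PySem.Str.join "" ([] : List String) = "" := by
  apply String.toList_inj.mp
  simp [PySem.Str.toList_join, PySem.Chars.join_nil]

lemma pvCharsJoinCons (p : List Char) (ps : List (List Char)) :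
    PySem.Chars.join [] (p :: ps) = p ++ PySem.Chars.join [] ps := by
  cases ps with
  | nil => simp [PySem.Chars.join_singleton]
  | cons q l => rw [PySem.Chars.join_cons_cons]; simp

lemma pvJoinCons (p : String) (ps : List String) :
    PySem.Str.join "" (p :: ps) = p ++ PySem.Str.join "" ps := by
  apply String.toList_inj.mp
  simp [PySem.Str.toList_join, pvCharsJoinCons]

lemma pvLoopA_eq (coins : List String) : ∀ (s : Int) (acc : String) (t : Int),
    pvLoopA (PySem.List.enumerate coins s) acc t =
    pvLoopP ((PySem.List.enumerate coins s).map (fun ic => pvPart ic.1 ic.2)) acc t := by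
  induction coins with
  | nil => intro s acc t; simp [PySem.List.enumerate_nil, pvLoopA, pvLoopP]
  | cons c rest ih =>
    intro s acc t
    simp only [PySem.List.enumerate_cons, List.map_cons, pvLoopA, pvLoopP]
    rw [show ("<b>" ++ (if s > 0 then ", " else "") ++ c ++ "</b>") = pvPart s c from rfl]
    split
    · rfl
    · exact ih _ _ _

lemma pvLoopP_eq (ps : List String) : ∀ (acc : String) (t : Int),
    pvLoopP ps acc t =
    acc ++ (PySem.Str.join "" (ps.take (pvM ps t)) ++ (if pvM ps t < ps.length then "..." else "")) := by
  induction ps with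
  | nil => intro acc t; simp [pvLoopP, pvM, pvJoinNil]
  | cons p rest ih =>
    intro acc t
    simp only [pvLoopP, pvM]
    split
    · simp [List.take_zero, pvJoinNil]
    · rw [ih, List.take_succ_cons, pvJoinCons]
      simp [String.append_assoc]

lemma pvCumLoop_eq (ps : List String) : ∀ (cum : List Int) (t : Int),
    (pvCumLoop ps cum t).1 = cum ++ pvCums ps t := by
  induction ps with
  | nil => intro cum t; simp [pvCumLoop, pvCums]
  | cons p rest ih =>
    intro cum t
    simp only [pvCumLoop, pvCums]
    rw [ih]
    simp

lemma pvS_nonneg (ps : List String) : 0 ≤ pvS ps := by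
  apply List.sum_nonneg
  intro x hx
  simp only [List.mem_map] at hx
  obtain ⟨s, _, rfl⟩ := hx
  simp [pysem]

lemma pvS_append (a b : List String) : pvS (a ++ b) = pvS a + pvS b := by
  simp [pvS]

lemma pvS_take_mono (ps : List String) (j j' : Nat) (h : j ≤ j') :
    pvS (ps.take j) ≤ pvS (ps.take j') := by
  have hsplit : ps.take j' = ps.take j ++ (ps.drop j).take (j' - j) := by
    rw [← List.take_add]
    congr 1
    omega
  rw [hsplit, pvS_append]
  have := pvS_nonneg ((ps.drop j).take (j' - j))
  omega

lemma pvCums_getD (ps : List String) : ∀ (t : Int) (j : Nat), j < ps.length →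
    (pvCums ps t).getD j 0 = t + pvS (ps.take (j + 1)) := by
  induction ps with
  | nil => intro t j h; simp at h
  | cons p rest ih =>
    intro t j h
    cases j with
    | zero => simp [pvCums, pvS]
    | succ j' =>
      simp only [pvCums, List.getD_cons_succ]
      rw [ih (t + PySem.Str.len p) j' (by simpa using h)]
      simp [pvS]
      ring

lemma pvCumVal (ps : List String) (base : Int) (j : Nat) (h : j ≤ ps.length) :
    PySem.List.pyGetD (base :: pvCums ps base) ((j : Nat) : Int) 0 = base + pvS (ps.take j) := by
  rw [PySem.List.pyGetD_natCast]
  cases j with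
  | zero => simp [pvS]
  | succ j' =>
    simp only [List.getD_cons_succ]
    exact pvCums_getD ps base j' (by omega)

lemma pvM_le (ps : List String) : ∀ t, pvM ps t ≤ ps.length := by
  induction ps with
  | nil => intro t; simp [pvM]
  | cons p rest ih =>
    intro t
    simp only [pvM, List.length_cons]
    split
    · omega
    · have := ih (t + PySem.Str.len p); omega

lemma pvM_accepted (ps : List String) : ∀ t, 0 < pvM ps t →
    t + pvS (ps.take (pvM ps t)) + PySem.Str.len "..." ≤ 4096 := by
  induction ps with
  | nil => intro t h; simp [pvM] at h
  | cons p rest ih =>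
    intro t h
    simp only [pvM] at h ⊢
    split
    · rename_i hc; rw [if_pos hc] at h; omega
    · rename_i hc
      rw [if_neg hc] at h
      rw [List.take_succ_cons]
      by_cases hm : 0 < pvM rest (t + PySem.Str.len p)
      · have := ih (t + PySem.Str.len p) hm
        simp only [pvS, List.map_cons, List.sum_cons] at *
        omega
      · have hm0 : pvM rest (t + PySem.Str.len p) = 0 := by omega
        rw [hm0]
        simp only [List.take_zero, pvS, List.map_cons, List.map_nil, List.sum_cons, List.sum_nil]
        omega

lemma pvM_rejected (ps : List String) : ∀ t, pvM ps t < ps.length →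
    4096 < t + pvS (ps.take (pvM ps t + 1)) + PySem.Str.len "..." := by
  induction ps with
  | nil => intro t h; simp [pvM] at h
  | cons p rest ih =>
    intro t h
    simp only [pvM] at h ⊢
    split
    · rename_i hc
      simp only [zero_add, List.take_succ_cons, List.take_zero, pvS, List.map_cons,
        List.map_nil, List.sum_cons, List.sum_nil]
      omega
    · rename_i hc
      rw [if_neg hc] at h
      simp only [List.length_cons] at h
      have hlt : pvM rest (t + PySem.Str.len p) < rest.length := by omega
      have := ih (t + PySem.Str.len p) hlt
      rw [List.take_succ_cons]
      simp only [pvS, List.map_cons, List.sum_cons] at *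
      omega

lemma pvFindK_eq (cum : List Int) (budget : Int) :
    ∀ (k m : Nat), m ≤ k →
    (∀ j : Nat, m < j → j ≤ k → budget < PySem.List.pyGetD cum ((j : Nat) : Int) 0) →
    (0 < m → PySem.List.pyGetD cum ((m : Nat) : Int) 0 ≤ budget) →
    pvFindK cum budget k = m := by
  intro k
  induction k with
  | zero => intro m hm _ _; simp only [pvFindK]; omega
  | succ k ih =>
    intro m hm hgt hle
    simp only [pvFindK]
    by_cases hmk : m = k + 1
    · subst hmk
      have := hle (by omega)
      rw [if_neg (by omega)]
    · have hmle : m ≤ k := by omega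
      have hc := hgt (k + 1) (by omega) (by omega)
      rw [if_pos hc]
      exact ih m hmle (fun j h1 h2 => hgt j h1 (by omega)) hle

lemma pvLen_ellipsis : PySem.Str.len "..." = 3 := by decide

-- the main equality
lemma pvMain (blacklist_coins : List String) (header_text : String) :
    format_blacklist_message blacklist_coins header_text =
    format_blacklist_message_alt blacklist_coins header_text := by
  simp only [format_blacklist_message, format_blacklist_message_alt]
  rw [pvLoopA_eq, pvLoopP_eq]
  set parts := (PySem.List.enumerate blacklist_coins 0).map (fun ic => pvPart ic.1 ic.2) with hparts
  set base := PySem.Str.len header_text with hbase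
  have hcum : (pvCumLoop parts [base] base).1 = base :: pvCums parts base := by
    rw [pvCumLoop_eq]; rfl
  have hk : pvFindK (pvCumLoop parts [base] base).1 (4096 - PySem.Str.len "...") parts.length = pvM parts base := by
    rw [hcum]
    apply pvFindK_eq
    · exact pvM_le parts base
    · intro j h1 h2
      rw [pvCumVal parts base j h2]
      have hrej := pvM_rejected parts base (by omega)
      have hmono := pvS_take_mono parts (pvM parts base + 1) j (by omega)
      rw [pvLen_ellipsis] at *
      omega
    · intro hpos
      rw [pvCumVal parts base (pvM parts base) (pvM_le parts base)]
      have hacc := pvM_accepted parts base hpos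
      rw [pvLen_ellipsis] at *
      omega
  rw [hk, PySem.List.slice_to_natCast]
  simp [String.append_assoc]

-- ===== VERDICT (by name: the statement is the Claim_ definition above) =====
theorem format_blacklist_message_spec : Claim_equal_format_blacklist_message := by
  intro blacklist_coins header_text _
  unfold Spec_format_blacklist_message
  exact pvMain blacklist_coins header_text
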